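-- pv_equiv track=rewrite | github.com/itchono/comrade-next | comrade/lib/text_utils/funny_formatting.py | owoify
-- ===== SOURCE A (Python) =====
-- def owoify(t: str):
--     """
--     Replace r's and l's with w's (matching case)
--
--     Parameters
--     ----------
--     t : str
--         The string to owoify
--
--     Returns
--     -------
--     str
--         The owoified string
--     """
--     remove_characters = ["R", "L", "r", "l"]
--     for character in remove_characters:
--         if character.islower():
--             t = t.replace(character, "w")
--         else:
--             t = t.replace(character, "W")
--     return t
-- ===== SOURCE B (Python) =====
-- def owoify(t: str):
--     return "".join(
--         "w" if c in "rl" else "W" if c in "RL" else c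
--         for c in t
--     )
-- ===== Notes on version B (the rewrite author's own statement) =====
-- stated objective: idiomatic
-- what changed: B replaces A's four sequential full-string str.replace passes with a single pass over the characters, emitting the case-matching mapped character for each and joining the results.
import Mathlib
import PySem

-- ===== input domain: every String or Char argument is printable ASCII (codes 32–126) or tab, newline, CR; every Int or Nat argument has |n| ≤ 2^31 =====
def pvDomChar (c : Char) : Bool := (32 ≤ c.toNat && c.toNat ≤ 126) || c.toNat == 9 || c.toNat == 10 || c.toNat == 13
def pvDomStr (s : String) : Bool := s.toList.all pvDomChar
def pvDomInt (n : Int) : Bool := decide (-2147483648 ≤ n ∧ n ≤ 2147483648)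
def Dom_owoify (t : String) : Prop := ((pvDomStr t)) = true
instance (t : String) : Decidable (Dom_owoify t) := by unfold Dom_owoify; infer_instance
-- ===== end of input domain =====

-- B does one pass over the characters instead of A's four full-string replace passes (idiomatic single traversal); same result.

-- ===== PORT A =====
-- Python A: for character in ["R","L","r","l"]: t = t.replace(character, "w" if islower else "W")
def owoify (t : String) : String :=
  (['R', 'L', 'r', 'l'] : List Char).foldl
    (fun t character =>
      if PySem.Chars.islower character then
        PySem.Str.replace t (String.ofList [character]) "w"
      else
        PySem.Str.replace t (String.ofList [character]) "W")
    t

-- ===== PORT B =====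
-- per-character mapped value, as in Source B's generator expression
def owoChar (c : Char) : Char :=
  if c == 'r' || c == 'l' then 'w'
  else if c == 'R' || c == 'L' then 'W'
  else c

-- ''.join of the mapped characters = the string of the mapped char list
def owoify_alt (t : String) : String :=
  String.ofList (t.toList.map owoChar)

-- ===== PRECONDITION & SPEC =====
def Spec_owoify (t : String) (out : String) : Prop := out = owoify_alt t
instance (t : String) (out : String) : Decidable (Spec_owoify t out) := by unfold Spec_owoify; infer_instance

-- ===== CLAIM (what is proved, stated in full; the proofs are below) =====
def Claim_equal_owoify : Prop := ∀ (t : String), Dom_owoify t → Spec_owoify t (owoify t)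

-- ===== LEMMAS AND PROOFS =====

-- replace.go with a single-char pattern and fuel = length is a map
lemma replace_go_single (a b : Char) :
    ∀ (l acc : List Char),
      PySem.Chars.replace.go [a] [b] l.length l acc
        = acc.reverse ++ l.map (fun c => if c = a then b else c) := by
  intro l
  induction l with
  | nil => intro acc; simp [PySem.Chars.replace.go]
  | cons c t ih =>
    intro acc
    simp only [List.length_cons, PySem.Chars.replace.go, List.map_cons]
    by_cases h : a = c
    · subst h
      simp [List.isPrefixOf, ih, List.append_assoc]
    · have hb : (a == c) = false := by simp [h]
      simp [List.isPrefixOf, hb, ih, Ne.symm h, List.append_assoc]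

lemma replace_single (s : List Char) (a b : Char) :
    PySem.Chars.replace s [a] [b] = s.map (fun c => if c = a then b else c) := by
  simpa [PySem.Chars.replace] using replace_go_single a b s []

lemma str_replace_single (s : String) (a b : Char) :
    PySem.Str.replace s (String.ofList [a]) (String.ofList [b])
      = String.ofList (s.toList.map (fun c => if c = a then b else c)) := by
  apply String.toList_inj.mp
  simp [PySem.Str.toList_replace, replace_single, String.toList_ofList]

lemma comp_owoChar (c : Char) :
    (if (if (if (if c = 'R' then 'W' else c) = 'L' then 'W'
            else if c = 'R' then 'W' else c) = 'r' then 'w'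
         else if (if c = 'R' then 'W' else c) = 'L' then 'W'
              else if c = 'R' then 'W' else c) = 'l' then 'w'
     else if (if (if c = 'R' then 'W' else c) = 'L' then 'W'
              else if c = 'R' then 'W' else c) = 'r' then 'w'
          else if (if c = 'R' then 'W' else c) = 'L' then 'W'
               else if c = 'R' then 'W' else c) = owoChar c := by
  unfold owoChar
  split_ifs <;> simp_all

-- ===== VERDICT (by name: the statement is the Claim_ definition above) =====
theorem owoify_spec : Claim_equal_owoify := by
  intro t _
  show owoify t = owoify_alt t
  unfold owoify owoify_alt
  simp only [List.foldl,
    show PySem.Chars.islower 'R' = false from rfl,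
    show PySem.Chars.islower 'L' = false from rfl,
    show PySem.Chars.islower 'r' = true from rfl,
    show PySem.Chars.islower 'l' = true from rfl,
    Bool.false_eq_true, if_false, if_true,
    show ("w" : String) = String.ofList ['w'] from rfl,
    show ("W" : String) = String.ofList ['W'] from rfl,
    str_replace_single, String.toList_ofList, List.map_map]
  congr 1
  apply List.map_congr_left
  intro c _
  simpa [Function.comp] using comp_owoChar c
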